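-- pv_equiv track=rewrite | github.com/idxaviid/Algoritmica | Practica7.py | negatius
-- ===== SOURCE A (Python) =====
-- def negatius(list):
--     if list == []:
--         return []
--     else:
--         pivot = list[0]
--         menors = negatius([x for x in list[1:] if x < pivot])                    #Hem guardo els numeros menors que el pivot, es a dir tots els negatius.
--         menorsIzq = negatius([x for x in menors[0:1] if x < pivot])              #Parteixo de nou els numeros menors
--         menorsDer = negatius([x for x in menors[1:] if x != menorsIzq])          #Parteixo de nou els numeros menors
--         majors = negatius([x for x in list[1:] if x >= pivot])                   #Hem guardo els numeros majors que el pivot, es a dir tots els positius.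
--         majorsIzq = negatius([x for x in majors[0:1] if x > pivot])              #Parteixo de nou els numeros majors
--         majorsDer = negatius([x for x in majors[1:] if x != majorsIzq])          #Parteixo de nou els numeros majors
--         return menorsDer + menorsIzq + [pivot] + majorsDer + majorsIzq           #Intercanvio l'ordre dels menors i dels majors, d'aquesta manera sempre estaran desordenats i a la vegada ordenats de negatius a positius.
-- ===== SOURCE B (Python) =====
-- def negatius(list):
--     # Memoized top-down rewrite: caches results by tuple key to kill the
--     # overlapping recomputation of A's exponential recursion; also drops A's
--     # dead filters (the `x != menorsIzq` tests compare an int with a list and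
--     # always pass, and negatius of a <=1-element list is that list itself).
--     cache = {}
--
--     def go(l):
--         t = tuple(l)
--         if t in cache:
--             return cache[t]
--         if not l:
--             r = []
--         else:
--             p = l[0]
--             m = go([x for x in l[1:] if x < p])
--             mD = go(m[1:])
--             M = go([x for x in l[1:] if x >= p])
--             MI = [M[0]] if M and M[0] > p else []
--             MD = go(M[1:])
--             r = mD + m[:1] + [p] + MD + MI
--         cache[t] = r
--         return r
--
--     return go(list)
-- ===== Notes on version B (the rewrite author's own statement) =====
-- stated objective: faster
-- what changed: B memoizes the recursion on the list itself (tuple-keyed cache) so every distinct sublist is computed once, and folds away A's dead work: the two `x != <list>` filters (an int is never equal to a list, so they always pass) and the recursive calls on lists of at most one element. Intended as faster: in timing runs A times out (>3.5s) at n=64 where B answers in ~2 ms; A's exponential blowup keeps that run from always certifying the ratio.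
import Mathlib
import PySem

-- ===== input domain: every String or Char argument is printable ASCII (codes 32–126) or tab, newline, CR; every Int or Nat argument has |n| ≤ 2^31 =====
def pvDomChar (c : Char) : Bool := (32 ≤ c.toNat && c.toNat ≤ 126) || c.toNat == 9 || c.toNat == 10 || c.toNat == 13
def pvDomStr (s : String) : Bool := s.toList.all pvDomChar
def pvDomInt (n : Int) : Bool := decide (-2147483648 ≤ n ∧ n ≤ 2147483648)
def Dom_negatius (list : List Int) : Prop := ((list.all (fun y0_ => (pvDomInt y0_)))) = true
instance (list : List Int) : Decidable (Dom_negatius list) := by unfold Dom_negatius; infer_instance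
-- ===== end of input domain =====

-- B memoizes the recursion on the list key (and drops A's vacuous filters), computing each
-- distinct sublist once; intended as faster (timing: A times out at n=64 where B answers in ms).

-- ===== PORT A =====
-- fuel-guarded transliteration of A; fuel (list.length + 1) always suffices
-- because every recursive call is on a strictly shorter list (aFuel_congr below).
def aFuel : Nat → List Int → List Int
  | 0, _ => []
  | n+1, l =>
    match l with
    | [] => []
    | pivot :: rest =>
      let menors := aFuel n (rest.filter (fun x => decide (x < pivot)))
      let menorsIzq := aFuel n ((PySem.List.slice menors (some 0) (some 1)).filter (fun x => decide (x < pivot)))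
      -- Python's `x != menorsIzq` compares an int with a list, hence is always True
      let menorsDer := aFuel n ((PySem.List.slice menors (some 1) none).filter (fun _ => true))
      let majors := aFuel n (rest.filter (fun x => decide (x ≥ pivot)))
      let majorsIzq := aFuel n ((PySem.List.slice majors (some 0) (some 1)).filter (fun x => decide (x > pivot)))
      -- Python's `x != majorsIzq` likewise is always True
      let majorsDer := aFuel n ((PySem.List.slice majors (some 1) none).filter (fun _ => true))
      menorsDer ++ menorsIzq ++ [pivot] ++ majorsDer ++ majorsIzq

def negatius (list : List Int) : List Int := aFuel (list.length + 1) list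

-- ===== PORT B =====
-- cache threaded explicitly; same fuel guard (Source B's recursion terminates for the same reason)
def bFuel : Nat → List Int → PySem.Dict (List Int) (List Int) →
    List Int × PySem.Dict (List Int) (List Int)
  | 0, _, c => ([], c)
  | n+1, l, c =>
    match PySem.Dict.get? c l with
    | some r => (r, c)
    | none =>
      match l with
      | [] => ([], PySem.Dict.insert c [] [])
      | p :: rest =>
        let s1 := bFuel n (rest.filter (fun x => decide (x < p))) c
        let m := s1.1
        let s2 := bFuel n (PySem.List.slice m (some 1) none) s1.2
        let mD := s2.1
        let s3 := bFuel n (rest.filter (fun x => decide (x ≥ p))) s2.2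
        let M := s3.1
        let MI := match M with
          | [] => []
          | q :: _ => if q > p then [q] else []
        let s4 := bFuel n (PySem.List.slice M (some 1) none) s3.2
        let MD := s4.1
        let r := mD ++ PySem.List.slice m (some 0) (some 1) ++ [p] ++ MD ++ MI
        (r, PySem.Dict.insert s4.2 l r)

def negatius_alt (list : List Int) : List Int :=
  (bFuel (list.length + 1) list PySem.Dict.empty).1

-- ===== PRECONDITION & SPEC =====
def Spec_negatius (list : List Int) (out : List Int) : Prop := out = negatius_alt list
instance (list : List Int) (out : List Int) : Decidable (Spec_negatius list out) := by unfold Spec_negatius; infer_instance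

-- ===== CLAIM (what is proved, stated in full; the proofs are below) =====
def Claim_equal_negatius : Prop := ∀ (list : List Int), Dom_negatius list → Spec_negatius list (negatius list)

-- ===== LEMMAS AND PROOFS =====
theorem slice01 (xs : List Int) : PySem.List.slice xs (some 0) (some 1) = xs.take 1 := by
  have := PySem.List.slice_to_natCast xs 1
  simp at this
  simp [PySem.List.slice_zero_start, this]

theorem filter_ge_length (p : Int) (l : List Int) :
    (l.filter (fun x => decide (x < p))).length + (l.filter (fun x => decide (x ≥ p))).length = l.length := by
  induction l with
  | nil => simp
  | cons a t ih =>
    by_cases h : a < p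
    · simp [h, not_le.mpr h, ge_iff_le] at *; omega
    · simp [h, not_lt.mp h, ge_iff_le] at *; omega

theorem take_tail_len (m : List Int) : (m.take 1).length + m.tail.length = m.length := by
  rw [← List.drop_one, ← List.length_append, List.take_append_drop]

theorem aFuel_len_le (n : Nat) : ∀ l : List Int, (aFuel n l).length ≤ l.length := by
  induction n with
  | zero => intro l; simp [aFuel]
  | succ n ih =>
    intro l
    cases l with
    | nil => simp [aFuel]
    | cons pivot rest =>
      simp only [aFuel, slice01, PySem.List.slice_from_one, List.filter_true]
      have h1 := ih (rest.filter (fun x => decide (x < pivot)))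
      have h2 := ih (rest.filter (fun x => decide (x ≥ pivot)))
      have h3 := ih (((aFuel n (rest.filter (fun x => decide (x < pivot)))).take 1).filter
        (fun x => decide (x < pivot)))
      have h4 := ih ((aFuel n (rest.filter (fun x => decide (x < pivot)))).tail)
      have h5 := ih (((aFuel n (rest.filter (fun x => decide (x ≥ pivot)))).take 1).filter
        (fun x => decide (x > pivot)))
      have h6 := ih ((aFuel n (rest.filter (fun x => decide (x ≥ pivot)))).tail)
      have hp := filter_ge_length pivot rest
      have t3 : (((aFuel n (rest.filter (fun x => decide (x < pivot)))).take 1).filter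
          (fun x => decide (x < pivot))).length ≤ ((aFuel n (rest.filter (fun x => decide (x < pivot)))).take 1).length :=
        List.length_filter_le _ _
      have t5 : (((aFuel n (rest.filter (fun x => decide (x ≥ pivot)))).take 1).filter
          (fun x => decide (x > pivot))).length ≤ ((aFuel n (rest.filter (fun x => decide (x ≥ pivot)))).take 1).length :=
        List.length_filter_le _ _
      have p1 := take_tail_len (aFuel n (rest.filter (fun x => decide (x < pivot))))
      have p2 := take_tail_len (aFuel n (rest.filter (fun x => decide (x ≥ pivot))))
      simp only [List.length_append, List.length_cons, List.length_nil]
      omega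

theorem mem_aFuel (n : Nat) : ∀ (l : List Int) (x : Int), x ∈ aFuel n l → x ∈ l := by
  induction n with
  | zero => intro l x h; simp [aFuel] at h
  | succ n ih =>
    intro l x h
    cases l with
    | nil => simp [aFuel] at h
    | cons pivot rest =>
      simp only [aFuel, slice01, PySem.List.slice_from_one, List.filter_true, List.mem_append,
        List.mem_cons] at h
      rcases h with (((h | h) | rfl | h) | h) | h
      · exact List.mem_cons_of_mem _ (List.mem_of_mem_filter (ih _ _ (List.mem_of_mem_tail (ih _ _ h))))
      · exact List.mem_cons_of_mem _ (List.mem_of_mem_filter (ih _ _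
          (List.mem_of_mem_take (List.mem_of_mem_filter (ih _ _ h)))))
      · exact List.mem_cons_self
      · simp at h
      · exact List.mem_cons_of_mem _ (List.mem_of_mem_filter (ih _ _ (List.mem_of_mem_tail (ih _ _ h))))
      · exact List.mem_cons_of_mem _ (List.mem_of_mem_filter (ih _ _
          (List.mem_of_mem_take (List.mem_of_mem_filter (ih _ _ h)))))
theorem aFuel_congr : ∀ (n m : Nat) (l : List Int), l.length < n → l.length < m →
    aFuel n l = aFuel m l := by
  intro n
  induction n with
  | zero => intro m l h; omega
  | succ n ih =>
    intro m l h1 h2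
    match m, h2 with
    | m+1, h2 =>
    cases l with
    | nil => simp [aFuel]
    | cons pivot rest =>
      simp only [List.length_cons] at h1 h2
      simp only [aFuel]
      have hA1 : (rest.filter (fun x => decide (x < pivot))).length ≤ rest.length :=
        List.length_filter_le _ _
      have hA2 : (rest.filter (fun x => decide (x ≥ pivot))).length ≤ rest.length :=
        List.length_filter_le _ _
      have e1 : aFuel n (rest.filter (fun x => decide (x < pivot)))
          = aFuel m (rest.filter (fun x => decide (x < pivot))) := by
        exact ih m _ (by omega) (by omega)
      have e4 : aFuel n (rest.filter (fun x => decide (x ≥ pivot)))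
          = aFuel m (rest.filter (fun x => decide (x ≥ pivot))) := by
        exact ih m _ (by omega) (by omega)
      rw [e1, e4]
      have lm := aFuel_len_le m (rest.filter (fun x => decide (x < pivot)))
      have lM := aFuel_len_le m (rest.filter (fun x => decide (x ≥ pivot)))
      have e2 : aFuel n ((PySem.List.slice (aFuel m (rest.filter (fun x => decide (x < pivot)))) (some 0) (some 1)).filter (fun x => decide (x < pivot)))
          = aFuel m ((PySem.List.slice (aFuel m (rest.filter (fun x => decide (x < pivot)))) (some 0) (some 1)).filter (fun x => decide (x < pivot))) := by
        apply ih m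
        all_goals
          simp only [slice01]
          have t1 := List.length_filter_le (fun x => decide (x < pivot)) ((aFuel m (rest.filter (fun x => decide (x < pivot)))).take 1)
          have t3 := take_tail_len (aFuel m (rest.filter (fun x => decide (x < pivot))))
          omega
      have e3 : aFuel n ((PySem.List.slice (aFuel m (rest.filter (fun x => decide (x < pivot)))) (some 1) none).filter (fun _ => true))
          = aFuel m ((PySem.List.slice (aFuel m (rest.filter (fun x => decide (x < pivot)))) (some 1) none).filter (fun _ => true)) := by
        apply ih m
        all_goals
          simp only [List.filter_true, PySem.List.slice_from_one, List.length_tail]; omega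
      have e5 : aFuel n ((PySem.List.slice (aFuel m (rest.filter (fun x => decide (x ≥ pivot)))) (some 0) (some 1)).filter (fun x => decide (x > pivot)))
          = aFuel m ((PySem.List.slice (aFuel m (rest.filter (fun x => decide (x ≥ pivot)))) (some 0) (some 1)).filter (fun x => decide (x > pivot))) := by
        apply ih m
        all_goals
          simp only [slice01]
          have t1 := List.length_filter_le (fun x => decide (x > pivot)) ((aFuel m (rest.filter (fun x => decide (x ≥ pivot)))).take 1)
          have t3 := take_tail_len (aFuel m (rest.filter (fun x => decide (x ≥ pivot))))
          omega
      have e6 : aFuel n ((PySem.List.slice (aFuel m (rest.filter (fun x => decide (x ≥ pivot)))) (some 1) none).filter (fun _ => true))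
          = aFuel m ((PySem.List.slice (aFuel m (rest.filter (fun x => decide (x ≥ pivot)))) (some 1) none).filter (fun _ => true)) := by
        apply ih m
        all_goals
          simp only [List.filter_true, PySem.List.slice_from_one, List.length_tail]; omega
      rw [e2, e3, e5, e6]
theorem negatius_nil : negatius [] = [] := by simp [negatius, aFuel]

theorem aFuel_succ_cons (n : Nat) (pivot : Int) (rest : List Int) :
    aFuel (n+1) (pivot :: rest) =
      aFuel n ((PySem.List.slice (aFuel n (rest.filter (fun x => decide (x < pivot)))) (some 1) none).filter (fun _ => true))
      ++ aFuel n ((PySem.List.slice (aFuel n (rest.filter (fun x => decide (x < pivot)))) (some 0) (some 1)).filter (fun x => decide (x < pivot)))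
      ++ [pivot]
      ++ aFuel n ((PySem.List.slice (aFuel n (rest.filter (fun x => decide (x ≥ pivot)))) (some 1) none).filter (fun _ => true))
      ++ aFuel n ((PySem.List.slice (aFuel n (rest.filter (fun x => decide (x ≥ pivot)))) (some 0) (some 1)).filter (fun x => decide (x > pivot))) := rfl

theorem negatius_len_le (l : List Int) : (negatius l).length ≤ l.length := aFuel_len_le _ l

theorem mem_negatius (l : List Int) (x : Int) (h : x ∈ negatius l) : x ∈ l := mem_aFuel _ l x h

theorem negatius_singleton (q : Int) : negatius [q] = [q] := by
  simp [negatius, aFuel, PySem.List.slice]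

theorem negatius_take1 (xs : List Int) : negatius (xs.take 1) = xs.take 1 := by
  cases xs with
  | nil => simpa using negatius_nil
  | cons a t => simpa using negatius_singleton a

theorem negatius_cons (p : Int) (rest : List Int) :
    negatius (p :: rest) =
      negatius ((negatius (rest.filter (fun x => decide (x < p)))).tail)
      ++ (negatius (rest.filter (fun x => decide (x < p)))).take 1
      ++ [p]
      ++ negatius ((negatius (rest.filter (fun x => decide (x ≥ p)))).tail)
      ++ (match negatius (rest.filter (fun x => decide (x ≥ p))) with
          | [] => []
          | q :: _ => if q > p then [q] else []) := by
  have hL : negatius (p :: rest) = aFuel (rest.length + 1 + 1) (p :: rest) := by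
    simp [negatius]
  rw [hL, aFuel_succ_cons]
  simp only [slice01, PySem.List.slice_from_one, List.filter_true]
  have hA1 : (rest.filter (fun x => decide (x < p))).length ≤ rest.length :=
    List.length_filter_le _ _
  have hA2 : (rest.filter (fun x => decide (x ≥ p))).length ≤ rest.length :=
    List.length_filter_le _ _
  have c1 : aFuel (rest.length + 1) (rest.filter (fun x => decide (x < p)))
      = negatius (rest.filter (fun x => decide (x < p))) :=
    aFuel_congr _ _ _ (by omega) (by omega)
  have c4 : aFuel (rest.length + 1) (rest.filter (fun x => decide (x ≥ p)))
      = negatius (rest.filter (fun x => decide (x ≥ p))) :=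
    aFuel_congr _ _ _ (by omega) (by omega)
  rw [c1, c4]
  have lm := negatius_len_le (rest.filter (fun x => decide (x < p)))
  have lM := negatius_len_le (rest.filter (fun x => decide (x ≥ p)))
  have ptm := take_tail_len (negatius (rest.filter (fun x => decide (x < p))))
  have ptM := take_tail_len (negatius (rest.filter (fun x => decide (x ≥ p))))
  -- the take-1 filter is a no-op: everything in `menors` came from the < p filter
  have hft : ((negatius (rest.filter (fun x => decide (x < p)))).take 1).filter
      (fun x => decide (x < p)) = (negatius (rest.filter (fun x => decide (x < p)))).take 1 := by
    apply List.filter_eq_self.mpr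
    intro x hx
    have hx' := mem_negatius _ _ (List.mem_of_mem_take hx)
    exact (List.mem_filter.mp hx').2
  rw [hft]
  have c2 : aFuel (rest.length + 1) ((negatius (rest.filter (fun x => decide (x < p)))).take 1)
      = negatius ((negatius (rest.filter (fun x => decide (x < p)))).take 1) :=
    aFuel_congr _ _ _ (by have := List.length_take_le 1 (negatius (rest.filter (fun x => decide (x < p)))); omega)
      (by omega)
  rw [c2, negatius_take1]
  have c3 : aFuel (rest.length + 1) ((negatius (rest.filter (fun x => decide (x < p)))).tail)
      = negatius ((negatius (rest.filter (fun x => decide (x < p)))).tail) :=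
    aFuel_congr _ _ _ (by simp only [List.length_tail]; omega) (by omega)
  have c6 : aFuel (rest.length + 1) ((negatius (rest.filter (fun x => decide (x ≥ p)))).tail)
      = negatius ((negatius (rest.filter (fun x => decide (x ≥ p)))).tail) :=
    aFuel_congr _ _ _ (by simp only [List.length_tail]; omega) (by omega)
  rw [c3, c6]
  -- majorsIzq
  cases hM : negatius (rest.filter (fun x => decide (x ≥ p))) with
  | nil => simp [negatius_nil, aFuel]
  | cons q t =>
    simp only [List.take_succ_cons, List.take_zero, List.filter_cons, List.filter_nil]
    by_cases hq : q > p
    · have c5 : aFuel (rest.length + 1) [q] = negatius [q] := by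
        apply aFuel_congr _ _ _ _ (by omega)
        have : (q :: t).length ≤ rest.length := by rw [← hM]; omega
        simp at this ⊢; omega
      simp only [hq, decide_true, if_true]
      rw [c5, negatius_singleton]
    · simp only [hq, decide_false, if_false]
      simp [aFuel]
theorem bFuel_correct : ∀ (n : Nat) (l : List Int) (c : PySem.Dict (List Int) (List Int)),
    (∀ k v, PySem.Dict.get? c k = some v → v = negatius k) → l.length < n →
    (bFuel n l c).1 = negatius l ∧
      (∀ k v, PySem.Dict.get? (bFuel n l c).2 k = some v → v = negatius k) := by
  intro n
  induction n with
  | zero => intro l c hc h; exact absurd h (Nat.not_lt_zero _)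
  | succ n ih =>
    intro l c hc h
    cases hg : PySem.Dict.get? c l with
    | some r =>
      simp only [bFuel, hg]
      exact ⟨hc l r hg, hc⟩
    | none =>
      cases l with
      | nil =>
        simp only [bFuel, hg]
        refine ⟨negatius_nil.symm, ?_⟩
        intro k v hkv
        rw [PySem.Dict.get?_insert] at hkv
        by_cases hk : k = []
        · subst hk
          rw [if_pos rfl] at hkv
          injection hkv with h2
          rw [negatius_nil, ← h2]
        · rw [if_neg hk] at hkv; exact hc k v hkv
      | cons p rest =>
        have hr : rest.length < n := by simp at h; omega
        have bA1 : (rest.filter (fun x => decide (x < p))).length < n :=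
          lt_of_le_of_lt (List.length_filter_le _ _) hr
        have bA2 : (rest.filter (fun x => decide (x ≥ p))).length < n :=
          lt_of_le_of_lt (List.length_filter_le _ _) hr
        simp only [bFuel, hg]
        obtain ⟨e1, i1⟩ := ih (rest.filter (fun x => decide (x < p))) c hc bA1
        rw [e1]
        simp only [slice01, PySem.List.slice_from_one]
        have bT1 : ((negatius (rest.filter (fun x => decide (x < p)))).tail).length < n := by
          have := negatius_len_le (rest.filter (fun x => decide (x < p)))
          simp only [List.length_tail]; omega
        obtain ⟨e2, i2⟩ := ih ((negatius (rest.filter (fun x => decide (x < p)))).tail) _ i1 bT1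
        rw [e2]
        obtain ⟨e3, i3⟩ := ih (rest.filter (fun x => decide (x ≥ p))) _ i2 bA2
        rw [e3]
        have bT2 : ((negatius (rest.filter (fun x => decide (x ≥ p)))).tail).length < n := by
          have := negatius_len_le (rest.filter (fun x => decide (x ≥ p)))
          simp only [List.length_tail]; omega
        obtain ⟨e4, i4⟩ := ih ((negatius (rest.filter (fun x => decide (x ≥ p)))).tail) _ i3 bT2
        rw [e4]
        have hval : negatius ((negatius (rest.filter (fun x => decide (x < p)))).tail)
            ++ (negatius (rest.filter (fun x => decide (x < p)))).take 1
            ++ [p]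
            ++ negatius ((negatius (rest.filter (fun x => decide (x ≥ p)))).tail)
            ++ (match negatius (rest.filter (fun x => decide (x ≥ p))) with
                | [] => []
                | q :: _ => if q > p then [q] else []) = negatius (p :: rest) :=
          (negatius_cons p rest).symm
        constructor
        · simpa using hval
        · intro k v hkv
          rw [PySem.Dict.get?_insert] at hkv
          by_cases hk : k = p :: rest
          · subst hk
            rw [if_pos rfl] at hkv
            injection hkv with h2
            rw [← h2]
            simpa using hval
          · rw [if_neg hk] at hkv; exact i4 k v hkv

-- ===== VERDICT (by name: the statement is the Claim_ definition above) =====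
theorem negatius_spec : Claim_equal_negatius := by
  intro l _
  unfold Spec_negatius negatius_alt
  have h := bFuel_correct (l.length + 1) l PySem.Dict.empty
    (by intro k v hv; simp [PySem.Dict.get?_empty] at hv) (Nat.lt_succ_self _)
  exact h.1.symm
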